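-- pv_equiv track=rewrite | github.com/thetocha/python_practice | lab2.py | sum_mtr
-- ===== SOURCE A (Python) =====
-- def sum_mtr(matrix):
--     first_index = 0
--     first_flag = False
--     last_index = 0
--     summ = 0
--     for i in range(len(matrix)):
--         if matrix[i] < 0:
--             if not first_flag:
--                 first_index = i
--                 first_flag = True
--             elif first_flag:
--                 last_index = i
--
--     for i in matrix[first_index + 1:last_index]:
--         summ += i
--
--     return summ
-- ===== SOURCE B (Python) =====
-- def sum_mtr(matrix):
--     seen_first = False
--     running = 0
--     committed = 0
--     for x in matrix:
--         if not seen_first: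
--             if x < 0:
--                 seen_first = True
--         else:
--             if x < 0:
--                 committed = running
--             running += x
--     return committed
-- ===== Notes on version B (the rewrite author's own statement) =====
-- stated objective: alternative
-- what changed: Replaces A's two passes (an index loop locating the first/last negative, then a slice-summing loop) with a single streaming pass that keeps a running sum after the first negative and snapshots it at each later negative.
import Mathlib
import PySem

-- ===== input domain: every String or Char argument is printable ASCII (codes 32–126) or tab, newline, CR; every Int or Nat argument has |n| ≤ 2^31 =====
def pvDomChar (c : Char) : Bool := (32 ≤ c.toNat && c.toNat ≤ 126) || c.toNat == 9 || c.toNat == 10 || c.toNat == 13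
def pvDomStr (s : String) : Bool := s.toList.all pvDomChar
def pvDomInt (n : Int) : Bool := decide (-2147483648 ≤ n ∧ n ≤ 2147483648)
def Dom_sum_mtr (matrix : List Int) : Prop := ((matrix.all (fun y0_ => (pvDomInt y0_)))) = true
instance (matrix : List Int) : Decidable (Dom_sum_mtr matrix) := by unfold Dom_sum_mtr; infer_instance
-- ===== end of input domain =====

-- B replaces A's two passes (find first/last negative by index, then sum a slice)
-- with one streaming pass (running sum snapshotted at each later negative); same cost.

-- ===== PORT A =====
def sum_mtr (matrix : List Int) : Int :=
  let st :=
    (PySem.List.pyRange 0 (matrix.length : Int) 1).foldl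
      (fun (s : Int × Bool × Int) i =>
        if PySem.List.pyGetD matrix i 0 < 0 then
          if !s.2.1 then (i, true, s.2.2)
          else (s.1, s.2.1, i)
        else s)
      (0, false, 0)
  (PySem.List.slice matrix (some (st.1 + 1)) (some st.2.2)).foldl
    (fun summ i => summ + i) 0

-- ===== PORT B =====
def sum_mtr_alt (matrix : List Int) : Int :=
  let st :=
    matrix.foldl
      (fun (s : Bool × Int × Int) x =>
        if !s.1 then
          if x < 0 then (true, s.2.1, s.2.2) else s
        else
          if x < 0 then (true, s.2.1 + x, s.2.1)
          else (true, s.2.1 + x, s.2.2))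
      (false, 0, 0)
  st.2.2

-- ===== PRECONDITION & SPEC =====
def Spec_sum_mtr (matrix : List Int) (out : Int) : Prop := out = sum_mtr_alt matrix
instance (matrix : List Int) (out : Int) : Decidable (Spec_sum_mtr matrix out) := by unfold Spec_sum_mtr; infer_instance

-- ===== CLAIM (what is proved, stated in full; the proofs are below) =====
def Claim_equal_sum_mtr : Prop := ∀ (matrix : List Int), Dom_sum_mtr matrix → Spec_sum_mtr matrix (sum_mtr matrix)

-- ===== LEMMAS AND PROOFS =====

-- index of the first negative (junk l.length if none)
def pvFN : List Int → Nat
  | [] => 0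
  | x :: xs => if x < 0 then 0 else pvFN xs + 1

-- index of the last negative (junk 0 if none)
def pvLN : List Int → Nat
  | [] => 0
  | _ :: xs => if xs.any (fun y => decide (y < 0)) then pvLN xs + 1 else 0

-- sum of the elements strictly before the last negative (junk 0 if none)
def pvG : List Int → Int
  | [] => 0
  | x :: xs => if xs.any (fun y => decide (y < 0)) then x + pvG xs else 0

theorem pvG_take (t : List Int) (h : t.any (fun y => decide (y < 0)) = true) :
    pvG t = (t.take (pvLN t)).sum := by
  induction t with
  | nil => simp at h
  | cons x xs ih =>
    by_cases hxs : xs.any (fun y => decide (y < 0)) = true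
    · simp [pvG, pvLN, hxs, ih hxs]
    · simp [pvG, pvLN, hxs]

def pvStepA (matrix : List Int) (s : Int × Bool × Int) (i : Int) : Int × Bool × Int :=
  if PySem.List.pyGetD matrix i 0 < 0 then
    if !s.2.1 then (i, true, s.2.2)
    else (s.1, s.2.1, i)
  else s

def pvStepAe (s : Int × Bool × Int) (p : Int × Int) : Int × Bool × Int :=
  if p.2 < 0 then
    if !s.2.1 then (p.1, true, s.2.2)
    else (s.1, s.2.1, p.1)
  else s

def pvStepB (s : Bool × Int × Int) (x : Int) : Bool × Int × Int :=
  if !s.1 then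
    if x < 0 then (true, s.2.1, s.2.2) else s
  else
    if x < 0 then (true, s.2.1 + x, s.2.1)
    else (true, s.2.1 + x, s.2.2)

theorem pvA_range_eq_enum (matrix : List Int) (init : Int × Bool × Int) :
    (PySem.List.pyRange 0 (matrix.length : Int) 1).foldl (pvStepA matrix) init
      = (PySem.List.enumerate matrix 0).foldl pvStepAe init := by
  rw [PySem.List.enumerate_eq_map_pyRange (d := 0), List.foldl_map]
  rfl

-- phase 2 of A's first loop: first negative already seen
theorem pvA2 (l : List Int) : ∀ (s0 f j : Int),
    (PySem.List.enumerate l s0).foldl pvStepAe (f, true, j)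
      = (f, true, if l.any (fun y => decide (y < 0)) then s0 + (pvLN l : Int) else j) := by
  induction l with
  | nil => simp [PySem.List.enumerate_nil]
  | cons x xs ih =>
    intro s0 f j
    rw [PySem.List.enumerate_cons]
    by_cases hx : x < 0
    · by_cases hxs : xs.any (fun y => decide (y < 0)) = true
      · simp [List.foldl_cons, pvStepAe, hx, ih, hxs, pvLN]; ring
      · simp [List.foldl_cons, pvStepAe, hx, ih, hxs, pvLN]
    · by_cases hxs : xs.any (fun y => decide (y < 0)) = true
      · simp [List.foldl_cons, pvStepAe, hx, ih, hxs, pvLN]; ring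
      · simp [List.foldl_cons, pvStepAe, hx, ih, hxs]

-- full characterisation of A's first loop
theorem pvA1 (l : List Int) : ∀ (s0 : Int),
    (PySem.List.enumerate l s0).foldl pvStepAe (0, false, 0)
      = if l.any (fun y => decide (y < 0)) then
          (s0 + (pvFN l : Int), true,
            if (l.drop (pvFN l + 1)).any (fun y => decide (y < 0)) then
              s0 + (pvFN l : Int) + 1 + (pvLN (l.drop (pvFN l + 1)) : Int)
            else 0)
        else (0, false, 0) := by
  induction l with
  | nil => simp [PySem.List.enumerate_nil]
  | cons x xs ih =>
    intro s0
    rw [PySem.List.enumerate_cons]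
    by_cases hx : x < 0
    · by_cases hxs : xs.any (fun y => decide (y < 0)) = true
      · simp [List.foldl_cons, pvStepAe, hx, pvA2, hxs, pvFN]
      · simp [List.foldl_cons, pvStepAe, hx, pvA2, hxs, pvFN]
    · by_cases hxs : xs.any (fun y => decide (y < 0)) = true
      · simp [List.foldl_cons, pvStepAe, hx, ih, hxs, pvFN]
        constructor
        · ring
        · split <;> ring_nf
      · simp [List.foldl_cons, pvStepAe, hx, ih, hxs]

-- phase 2 of B's loop: first negative already seen
theorem pvB2 (l : List Int) : ∀ (r c : Int),
    l.foldl pvStepB (true, r, c)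
      = (true, r + l.sum, if l.any (fun y => decide (y < 0)) then r + pvG l else c) := by
  induction l with
  | nil => simp
  | cons x xs ih =>
    intro r c
    by_cases hx : x < 0
    · by_cases hxs : xs.any (fun y => decide (y < 0)) = true
      · simp [List.foldl_cons, pvStepB, hx, ih, hxs, pvG]
        exact ⟨by ring, by ring⟩
      · simp [List.foldl_cons, pvStepB, hx, ih, hxs, pvG]; ring
    · by_cases hxs : xs.any (fun y => decide (y < 0)) = true
      · simp [List.foldl_cons, pvStepB, hx, ih, hxs, pvG]
        constructor
        · ring
        · ring
      · simp [List.foldl_cons, pvStepB, hx, ih, hxs]; ring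

-- full characterisation of B's loop
theorem pvB1 (l : List Int) :
    l.foldl pvStepB (false, 0, 0)
      = if l.any (fun y => decide (y < 0)) then
          (true, (l.drop (pvFN l + 1)).sum,
            if (l.drop (pvFN l + 1)).any (fun y => decide (y < 0)) then
              pvG (l.drop (pvFN l + 1))
            else 0)
        else (false, 0, 0) := by
  induction l with
  | nil => simp
  | cons x xs ih =>
    by_cases hx : x < 0
    · by_cases hxs : xs.any (fun y => decide (y < 0)) = true
      · simp [List.foldl_cons, pvStepB, hx, pvB2, hxs, pvFN]
      · simp [List.foldl_cons, pvStepB, hx, pvB2, hxs, pvFN]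
    · by_cases hxs : xs.any (fun y => decide (y < 0)) = true
      · simp [List.foldl_cons, pvStepB, hx, ih, hxs, pvFN]
      · simp [List.foldl_cons, pvStepB, hx, ih, hxs]

-- ===== VERDICT (by name: the statement is the Claim_ definition above) =====
theorem sum_mtr_spec : Claim_equal_sum_mtr := by
  intro matrix _
  unfold Spec_sum_mtr sum_mtr sum_mtr_alt
  rw [show (fun (s : Int × Bool × Int) i =>
        if PySem.List.pyGetD matrix i 0 < 0 then
          if !s.2.1 then (i, true, s.2.2)
          else (s.1, s.2.1, i)
        else s) = pvStepA matrix from rfl]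
  rw [show (fun (s : Bool × Int × Int) x =>
        if !s.1 then
          if x < 0 then (true, s.2.1, s.2.2) else s
        else
          if x < 0 then (true, s.2.1 + x, s.2.1)
          else (true, s.2.1 + x, s.2.2)) = pvStepB from rfl]
  rw [pvA_range_eq_enum, pvA1, pvB1, PySem.List.foldl_add (g := fun x => x)]
  by_cases hl : matrix.any (fun y => decide (y < 0)) = true
  · simp only [hl, if_pos]
    by_cases hs : (matrix.drop (pvFN matrix + 1)).any (fun y => decide (y < 0)) = true
    · simp only [hs, if_pos]
      have h2 : (0:Int) + (pvFN matrix : Int) + 1 + (pvLN (matrix.drop (pvFN matrix + 1)) : Int)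
          = ((pvFN matrix + 1 + pvLN (matrix.drop (pvFN matrix + 1)) : Nat) : Int) := by
        push_cast; ring
      have h1 : (0:Int) + (pvFN matrix : Int) + 1 = ((pvFN matrix + 1 : Nat) : Int) := by
        push_cast; ring
      rw [h2, h1, PySem.List.slice_natCast, pvG_take _ hs]
      simp
    · simp only [hs, Bool.false_eq_true, if_false]
      rw [PySem.List.slice_toNat _ (by positivity) (by norm_num)]
      simp
  · simp only [hl, Bool.false_eq_true, if_false]
    rw [PySem.List.slice_toNat _ (by norm_num) (by norm_num)]
    simp
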